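-- pv_equiv track=rewrite | github.com/fbkarsdorp/deepflow | bot_or_not/feature_extraction.py | group_syllables
-- ===== SOURCE A (Python) =====
-- from typing import List, Dict, Tuple
--
-- def group_syllables(line) -> List[List[str]]:
--     words = []
--     for syllable in line:
--         if syllable.startswith("-"):
--             if not words:
--                 words.append([])
--             words[-1].append(syllable)
--         else:
--             words.append([syllable])
--     return words
-- ===== SOURCE B (Python) =====
-- def group_syllables(line):
--     # Run decomposition: each word is a boundary syllable together with the
--     # run of '-'-prefixed syllables that follows it; emit it as one slice.
--     words = []
--     i, n = 0, len(line)
--     while i < n: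
--         j = i + 1
--         while j < n and line[j].startswith("-"):
--             j += 1
--         words.append(line[i:j])
--         i = j
--     return words
-- ===== Notes on version B (the rewrite author's own statement) =====
-- stated objective: alternative
-- what changed: Replaces A's streaming loop that appends into the last group of a growing accumulator with a run-decomposition pass: scan to the end of each run of '-'-prefixed syllables and emit the whole word as one slice.
import Mathlib
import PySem

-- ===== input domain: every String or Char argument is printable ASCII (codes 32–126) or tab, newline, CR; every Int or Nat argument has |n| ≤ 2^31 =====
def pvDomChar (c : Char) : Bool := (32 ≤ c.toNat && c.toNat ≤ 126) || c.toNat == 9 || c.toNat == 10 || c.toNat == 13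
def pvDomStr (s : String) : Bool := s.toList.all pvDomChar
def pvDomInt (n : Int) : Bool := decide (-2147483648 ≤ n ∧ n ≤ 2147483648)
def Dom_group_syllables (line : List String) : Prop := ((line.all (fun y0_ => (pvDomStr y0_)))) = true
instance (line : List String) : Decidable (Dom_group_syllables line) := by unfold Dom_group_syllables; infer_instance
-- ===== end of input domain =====

-- ===== PORT A =====
-- B emits each word in one step (boundary syllable plus its run of '-'-prefixed followers) instead of A's append-to-last-group streaming loop; alternative decomposition, same cost.
def group_syllables (line : List String) : List (List String) :=
  line.foldl (fun words syllable =>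
    if PySem.Str.startswith syllable "-" then
      let words := if words = [] then [[]] else words
      words.dropLast ++ [(words.getLast?.getD []) ++ [syllable]]
    else words ++ [[syllable]]) []

-- ===== PORT B =====
def group_syllables_alt : List String → List (List String)
  | [] => []
  | s :: rest =>
    (s :: rest.takeWhile (fun t => PySem.Str.startswith t "-")) ::
      group_syllables_alt (rest.dropWhile (fun t => PySem.Str.startswith t "-"))
  termination_by l => l.length
  decreasing_by
    simpa using Nat.lt_succ_of_le (List.length_dropWhile_le _ _)

-- ===== PRECONDITION & SPEC =====
def Spec_group_syllables (line : List String) (out : List (List String)) : Prop := out = group_syllables_alt line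
instance (line : List String) (out : List (List String)) : Decidable (Spec_group_syllables line out) := by unfold Spec_group_syllables; infer_instance

-- ===== CLAIM (what is proved, stated in full; the proofs are below) =====
def Claim_equal_group_syllables : Prop := ∀ (line : List String), Dom_group_syllables line → Spec_group_syllables line (group_syllables line)

-- ===== LEMMAS AND PROOFS =====

-- the step function of A's fold, named for the lemmas
def pvStep (words : List (List String)) (syllable : String) : List (List String) :=
  if PySem.Str.startswith syllable "-" then
    let words := if words = [] then [[]] else words
    words.dropLast ++ [(words.getLast?.getD []) ++ [syllable]]
  else words ++ [[syllable]]

theorem pvFold_invariant (line : List String) : ∀ (ws : List (List String)) (w : List String),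
    line.foldl pvStep (ws ++ [w]) =
      ws ++ (w ++ line.takeWhile (fun t => PySem.Str.startswith t "-")) ::
        group_syllables_alt (line.dropWhile (fun t => PySem.Str.startswith t "-")) := by
  induction line with
  | nil => intro ws w; simp [group_syllables_alt]
  | cons s rest ih =>
    intro ws w
    by_cases h : PySem.Str.startswith s "-"
    · have hne : ws ++ [w] ≠ [] := by simp
      rw [List.foldl_cons]
      have hstep : pvStep (ws ++ [w]) s = ws ++ [w ++ [s]] := by
        simp only [pvStep, h]
        simp [hne]
      rw [hstep, ih ws (w ++ [s])]
      simp only [List.takeWhile_cons, List.dropWhile_cons, h]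
      simp
    · rw [Bool.not_eq_true] at h
      rw [List.foldl_cons]
      have hstep : pvStep (ws ++ [w]) s = (ws ++ [w]) ++ [[s]] := by
        simp only [pvStep, h]
        simp
      rw [hstep, ih (ws ++ [w]) [s]]
      simp only [List.takeWhile_cons, List.dropWhile_cons, h]
      simp [group_syllables_alt]

-- ===== VERDICT (by name: the statement is the Claim_ definition above) =====
theorem group_syllables_spec : Claim_equal_group_syllables := by
  intro line _
  unfold Spec_group_syllables
  cases line with
  | nil => simp [group_syllables, group_syllables_alt]
  | cons s rest =>
    show (s :: rest).foldl pvStep [] = _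
    have hfirst : pvStep [] s = [] ++ [[s]] := by
      by_cases h : PySem.Str.startswith s "-" <;> simp only [pvStep, h] <;> simp
    rw [List.foldl_cons, hfirst, pvFold_invariant rest [] [s]]
    simp [group_syllables_alt]
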